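-- pv_equiv track=rewrite | github.com/ombharatiya/standee | pdf-generator/generate_png_cards.py | _optimal_line_break
-- ===== SOURCE A (Python) =====
-- from typing import Dict, List, Tuple
--
-- def _optimal_line_break(text: str, char_threshold: int, max_lines: int = 2) -> List[str]:
--     """
--     Break text into lines optimally based on character threshold.
--     Same logic as PDF generator.
--     """
--     tokens = []
--     current_token = ""
--
--     for char in text:
--         if char in [' ', ',']:
--             if current_token:
--                 if char == ',':
--                     tokens.append(current_token + ',')
--                 else:
--                     tokens.append(current_token)
--                 current_token = ""
--         else:
--             current_token += char
--
--     if current_token: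
--         tokens.append(current_token)
--
--     if len(tokens) == 0:
--         return [text]
--     if len(tokens) == 1:
--         return [text]
--
--     # For 2 lines, find the optimal break point
--     if max_lines == 2:
--         best_break = 0
--         best_first_line_len = 0
--
--         for i in range(1, len(tokens)):
--             first_line = ' '.join(tokens[:i])
--             first_line_len = len(first_line)
--
--             if first_line_len <= char_threshold:
--                 if first_line_len > best_first_line_len:
--                     best_first_line_len = first_line_len
--                     best_break = i
--
--         if best_break > 0:
--             first_line = ' '.join(tokens[:best_break])
--             second_line = ' '.join(tokens[best_break:])
--             return [first_line, second_line]
--         else: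
--             mid = len(tokens) // 2
--             first_line = ' '.join(tokens[:mid])
--             second_line = ' '.join(tokens[mid:])
--             return [first_line, second_line]
--
--     # For other cases, use simple greedy approach
--     lines = []
--     current_line = []
--
--     for token in tokens:
--         test_line = ' '.join(current_line + [token])
--         if len(test_line) <= char_threshold:
--             current_line.append(token)
--         else:
--             if current_line:
--                 lines.append(' '.join(current_line))
--                 current_line = [token]
--             else:
--                 lines.append(token)
--
--             if len(lines) >= max_lines:
--                 break
--
--     if current_line and len(lines) < max_lines:
--         lines.append(' '.join(current_line))
--
--     return lines[:max_lines]
-- ===== SOURCE B (Python) =====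
-- from typing import List
--
-- def _optimal_line_break(text: str, char_threshold: int, max_lines: int = 2) -> List[str]:
--     """
--     Same result as the original, by a different algorithm: tokens come from
--     str.split (a comma re-attached to the piece before it); the two-line break
--     is found by BINARY SEARCH on a precomputed prefix-length table (the
--     first-line length is strictly increasing in the break index, so the valid
--     break indices form a prefix and the best break is the largest valid one);
--     the multi-line case extracts whole chunks (the longest fitting prefix of
--     the remaining tokens, at least one token) instead of running a
--     token-by-token state machine.
--     """
--     tokens = []
--     for part in text.split(' '):
--         pieces = part.split(',')
--         tokens.extend(p + ',' for p in pieces[:-1] if p)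
--         if pieces[-1]:
--             tokens.append(pieces[-1])
--
--     if len(tokens) <= 1:
--         return [text]
--
--     n = len(tokens)
--
--     if max_lines == 2:
--         # pref[i] = len(' '.join(tokens[:i])) for i >= 1
--         pref = [0]
--         acc = -1
--         for t in tokens:
--             acc += len(t) + 1
--             pref.append(acc)
--         # largest i in [1, n-1] with pref[i] <= char_threshold (0 if none)
--         lo, hi = 0, n - 1
--         while lo < hi:
--             mid = (lo + hi + 1) // 2
--             if pref[mid] <= char_threshold:
--                 lo = mid
--             else:
--                 hi = mid - 1
--         best = lo if lo > 0 else n // 2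
--         return [' '.join(tokens[:best]), ' '.join(tokens[best:])]
--
--     # chunk extraction: each line is the longest fitting prefix of the
--     # remaining tokens (at least one token), up to max_lines lines
--     lines = []
--     rest = tokens
--     while rest and len(lines) < max_lines:
--         width = len(rest[0])
--         k = 1
--         for t in rest[1:]:
--             if width + 1 + len(t) > char_threshold:
--                 break
--             width += 1 + len(t)
--             k += 1
--         lines.append(' '.join(rest[:k]))
--         rest = rest[k:]
--     return lines
-- ===== Notes on version B (the rewrite author's own statement) =====
-- stated objective: faster
-- what changed: B tokenizes with str.split instead of a per-character scan, finds the two-line break by binary search over a precomputed prefix-length table (first-line length is strictly increasing in the break index, so valid breaks form a prefix and the best is the largest valid one) instead of joining and measuring every prefix, and builds multi-line output by extracting whole chunks (longest fitting prefix of the remaining tokens, at least one) instead of a token-by-token accumulator state machine.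
import Mathlib
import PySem

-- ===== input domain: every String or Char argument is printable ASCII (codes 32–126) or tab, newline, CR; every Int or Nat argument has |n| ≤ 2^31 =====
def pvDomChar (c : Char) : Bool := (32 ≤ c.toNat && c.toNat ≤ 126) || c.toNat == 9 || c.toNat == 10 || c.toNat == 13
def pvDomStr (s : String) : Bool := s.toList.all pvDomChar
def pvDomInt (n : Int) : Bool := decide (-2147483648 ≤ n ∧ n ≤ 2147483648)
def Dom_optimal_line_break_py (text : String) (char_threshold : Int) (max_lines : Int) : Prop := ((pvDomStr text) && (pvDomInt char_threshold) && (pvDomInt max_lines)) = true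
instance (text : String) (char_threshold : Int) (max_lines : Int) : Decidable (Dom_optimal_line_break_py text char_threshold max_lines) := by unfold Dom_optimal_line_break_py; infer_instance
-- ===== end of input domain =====

-- B tokenizes with str.split instead of A's per-character scan, finds the
-- two-line break by binary search on a precomputed prefix-length table instead
-- of A's join-and-measure scan over every prefix, and builds the multi-line
-- output by extracting whole chunks (longest fitting prefix of the remaining
-- tokens) instead of A's token-by-token accumulator state machine.

-- ===== PORT A =====
-- tokenization loop of A (chars; a comma sticks to the token before it)
def pvTokStepA (st : List (List Char) × List Char) (c : Char) : List (List Char) × List Char :=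
  if c = ' ' ∨ c = ',' then
    if st.2 ≠ [] then
      (st.1 ++ [if c = ',' then st.2 ++ [','] else st.2], [])
    else st
  else (st.1, st.2 ++ [c])

def pvTokensA (cs : List Char) : List (List Char) :=
  let st := cs.foldl pvTokStepA ([], [])
  if st.2 ≠ [] then st.1 ++ [st.2] else st.1

-- body of A's `for i in range(1, len(tokens))` loop; state = (best_break, best_first_line_len)
def pvBreakStepA (tokens : List (List Char)) (char_threshold : Int) (st : Int × Int) (i : Int) : Int × Int :=
  let first_line := PySem.Chars.join [' '] (PySem.List.slice tokens none (some i))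
  let first_line_len : Int := first_line.length
  if first_line_len ≤ char_threshold then
    if first_line_len > st.2 then (i, first_line_len) else st
  else st

-- body of A's greedy loop; state = (lines, current_line, broke)
def pvGreedyStepA (char_threshold max_lines : Int)
    (st : List (List Char) × List (List Char) × Bool) (token : List Char) :
    List (List Char) × List (List Char) × Bool :=
  if st.2.2 then st else
  let lines := st.1
  let cur := st.2.1
  let test_line := PySem.Chars.join [' '] (cur ++ [token])
  if (test_line.length : Int) ≤ char_threshold then (lines, cur ++ [token], false)
  else
    let lines' := if cur ≠ [] then lines ++ [PySem.Chars.join [' '] cur] else lines ++ [token]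
    let cur' := if cur ≠ [] then [token] else cur
    (lines', cur', if (lines'.length : Int) ≥ max_lines then true else false)

def optimal_line_break_py (text : String) (char_threshold : Int) (max_lines : Int) : List String :=
  let tokens := pvTokensA text.toList
  if tokens.length = 0 then [text]
  else if tokens.length = 1 then [text]
  else if max_lines = 2 then
    let st := (PySem.List.pyRange 1 (tokens.length : Int)).foldl (pvBreakStepA tokens char_threshold) (0, 0)
    if st.1 > 0 then
      [String.ofList (PySem.Chars.join [' '] (PySem.List.slice tokens none (some st.1))),
       String.ofList (PySem.Chars.join [' '] (PySem.List.slice tokens (some st.1) none))]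
    else
      let mid := PySem.Int.floordiv (tokens.length : Int) 2
      [String.ofList (PySem.Chars.join [' '] (PySem.List.slice tokens none (some mid))),
       String.ofList (PySem.Chars.join [' '] (PySem.List.slice tokens (some mid) none))]
  else
    let st := tokens.foldl (pvGreedyStepA char_threshold max_lines) ([], [], false)
    let lines := if st.2.1 ≠ [] ∧ (st.1.length : Int) < max_lines
      then st.1 ++ [PySem.Chars.join [' '] st.2.1] else st.1
    (PySem.List.slice lines none (some max_lines)).map String.ofList

-- ===== PORT B =====
-- body of B's `tokens.extend(p + ',' for p in pieces[:-1] if p)`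
def pvPartStepB (tk : List (List Char)) (p : List Char) : List (List Char) :=
  if p ≠ [] then tk ++ [p ++ [',']] else tk

-- B's split-based tokenizer; Python's str.split with a one-character separator
-- is exactly Mathlib's List.splitOn on the character list
def pvTokensB (cs : List Char) : List (List Char) :=
  (List.splitOn ' ' cs).foldl (fun toks part =>
    let pieces := List.splitOn ',' part
    let toks := (PySem.List.slice pieces none (some (-1))).foldl pvPartStepB toks
    if PySem.List.pyGetD pieces (-1) [] ≠ [] then
      toks ++ [PySem.List.pyGetD pieces (-1) []]
    else toks) []

-- body of B's `pref.append(acc)` loop; state = (pref, acc)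
def pvPrefStep (st : List Int × Int) (t : List Char) : List Int × Int :=
  (st.1 ++ [st.2 + (t.length : Int) + 1], st.2 + (t.length : Int) + 1)

-- midpoint bound used by the binary search's termination argument
theorem pvMid_bounds (lo hi : Int) (h : lo < hi) :
    lo + 1 ≤ PySem.Int.floordiv (lo + hi + 1) 2 ∧ PySem.Int.floordiv (lo + hi + 1) 2 ≤ hi := by
  have h2 : lo + hi + 1 = (lo + 1) + hi := by ring
  rw [h2]
  exact PySem.Int.floordiv_two_mid_bounds (by omega)

-- B's `while lo < hi` binary search on the prefix table
def pvBS (pref : List Int) (th : Int) (lo hi : Int) : Int :=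
  if h : lo < hi then
    let mid := PySem.Int.floordiv (lo + hi + 1) 2
    if PySem.List.pyGetD pref mid 0 ≤ th then pvBS pref th mid hi
    else pvBS pref th lo (mid - 1)
  else lo
termination_by (hi - lo).toNat
decreasing_by
  all_goals
    have := pvMid_bounds lo hi h
    omega

-- B's inner `for t in rest[1:]` counting loop (k - 1, given width = len(rest[0]))
def pvTakeAux (th : Int) : Int → List (List Char) → Nat
  | _, [] => 0
  | width, t :: ts =>
    if width + 1 + (t.length : Int) > th then 0
    else 1 + pvTakeAux th (width + 1 + (t.length : Int)) ts

-- B's `while rest and len(lines) < max_lines` chunk-extraction loop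
def pvPack (th ml : Int) (rest lines : List (List Char)) : List (List Char) :=
  match rest with
  | [] => lines
  | r0 :: rs =>
    if (lines.length : Int) ≥ ml then lines
    else
      let k := 1 + pvTakeAux th (r0.length : Int) rs
      pvPack th ml ((r0 :: rs).drop k) (lines ++ [PySem.Chars.join [' '] ((r0 :: rs).take k)])
termination_by rest.length
decreasing_by simp only [List.length_drop, List.length_cons]; omega

def optimal_line_break_py_alt (text : String) (char_threshold : Int) (max_lines : Int) : List String :=
  let tokens := pvTokensB text.toList
  if tokens.length ≤ 1 then [text]
  else if max_lines = 2 then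
    let pref := (tokens.foldl pvPrefStep ([0], -1)).1
    let lo := pvBS pref char_threshold 0 ((tokens.length : Int) - 1)
    let best := if lo > 0 then lo else PySem.Int.floordiv (tokens.length : Int) 2
    [String.ofList (PySem.Chars.join [' '] (PySem.List.slice tokens none (some best))),
     String.ofList (PySem.Chars.join [' '] (PySem.List.slice tokens (some best) none))]
  else
    (pvPack char_threshold max_lines tokens []).map String.ofList

-- ===== PRECONDITION & SPEC =====
def Spec_optimal_line_break_py (text : String) (char_threshold : Int) (max_lines : Int) (out : List String) : Prop := out = optimal_line_break_py_alt text char_threshold max_lines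
instance (text : String) (char_threshold : Int) (max_lines : Int) (out : List String) : Decidable (Spec_optimal_line_break_py text char_threshold max_lines out) := by unfold Spec_optimal_line_break_py; infer_instance

-- ===== CLAIM (what is proved, stated in full; the proofs are below) =====
def Claim_equal_optimal_line_break_py : Prop := ∀ (text : String) (char_threshold : Int) (max_lines : Int), Dom_optimal_line_break_py text char_threshold max_lines → Spec_optimal_line_break_py text char_threshold max_lines (optimal_line_break_py text char_threshold max_lines)

-- ===== LEMMAS AND PROOFS =====

-- every token produced by A's scan is nonempty
theorem pvTok_invA (cs : List Char) (st : List (List Char) × List Char)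
    (h : ∀ t ∈ st.1, t ≠ []) : ∀ t ∈ (cs.foldl pvTokStepA st).1, t ≠ [] := by
  induction cs generalizing st with
  | nil => exact h
  | cons c cs ih =>
    refine ih _ ?_
    intro t ht
    unfold pvTokStepA at ht
    by_cases h1 : c = ' ' ∨ c = ','
    · rw [if_pos h1] at ht
      by_cases h2 : st.2 = []
      · simp only [ne_eq, h2, not_true_eq_false, if_false] at ht
        exact h t ht
      · simp only [ne_eq, h2, not_false_eq_true, if_true, List.mem_append,
          List.mem_singleton] at ht
        rcases ht with ht | ht
        · exact h t ht
        · subst ht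
          split_ifs with h3
          · exact List.append_ne_nil_of_left_ne_nil h2 _
          · exact h2
    · rw [if_neg h1] at ht
      exact h t ht

theorem pvTokensA_ne_nil (cs : List Char) : ∀ t ∈ pvTokensA cs, t ≠ [] := by
  have h0 := pvTok_invA cs ([], []) (by simp)
  unfold pvTokensA
  intro t ht
  by_cases h : (cs.foldl pvTokStepA ([], [])).2 = []
  · simp only [h, ne_eq, not_true_eq_false, if_false] at ht
    exact h0 t ht
  · simp only [ne_eq, h, not_false_eq_true, if_true, List.mem_append, List.mem_singleton] at ht
    rcases ht with ht | ht
    · exact h0 t ht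
    · subst ht; exact h

-- xs[-1] with default is the last element
theorem pvGetLastD (xs : List (List Char)) (d : List Char) :
    PySem.List.pyGetD xs (-1) d = xs.getLastD d := by
  cases xs with
  | nil => rfl
  | cons a as =>
    simp only [PySem.List.pyGetD, PySem.List.pyGet?, PySem.List.pyIdx?]
    norm_num
    rw [List.getLast?_eq_getElem?]
    simp

-- B's inner fold collects the nonempty pieces with a comma re-attached
theorem pvInnerFold (xs : List (List Char)) (acc : List (List Char)) :
    xs.foldl pvPartStepB acc =
      acc ++ (xs.filter (fun p => !p.isEmpty)).map (fun p => p ++ [',']) := by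
  induction xs generalizing acc with
  | nil => simp
  | cons x xs ih =>
    simp only [List.foldl_cons, pvPartStepB, List.filter_cons]
    by_cases hx : x = []
    · simp [hx, ih]
    · simp only [ne_eq, hx, not_false_eq_true, if_true, ih]
      simp [hx]

-- the tokens contributed by one space-separated part
def pvP (part : List Char) : List (List Char) :=
  ((List.splitOn ',' part).dropLast.filter (fun p => !p.isEmpty)).map (fun p => p ++ [',']) ++
    (if (List.splitOn ',' part).getLastD [] ≠ [] then [(List.splitOn ',' part).getLastD []]
     else [])

theorem pvTokensB_flatMap (cs : List Char) :
    pvTokensB cs = (List.splitOn ' ' cs).flatMap pvP := by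
  unfold pvTokensB
  have hbody : (fun (toks : List (List Char)) (part : List Char) =>
      let pieces := List.splitOn ',' part
      let toks := (PySem.List.slice pieces none (some (-1))).foldl pvPartStepB toks
      if PySem.List.pyGetD pieces (-1) [] ≠ [] then
        toks ++ [PySem.List.pyGetD pieces (-1) []]
      else toks) = (fun toks part => toks ++ pvP part) := by
    funext toks part
    simp only [PySem.List.slice_to_neg_one, pvInnerFold, pvGetLastD, pvP]
    split_ifs with h
    · rw [List.append_assoc]
    · rw [List.append_nil]
  rw [hbody, PySem.List.foldl_append_eq_flatMap]
  rfl

-- splitting after a separator-free prefix only extends the first piece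
theorem pvSplit_prepend (p : Char → Bool) (pre : List Char) (rest : List Char)
    (h : ∀ c ∈ pre, ¬ p c) :
    List.splitOnP p (pre ++ rest) = (List.splitOnP p rest).modifyHead (pre ++ ·) := by
  induction pre with
  | nil => exact (congrFun List.modifyHead_id (List.splitOnP p rest)).symm
  | cons c pre ih =>
    have hc : ¬ p c := h c (by simp)
    rw [List.cons_append, List.splitOnP_cons, if_neg (by simpa using hc),
      ih (fun d hd => h d (by simp [hd])), List.modifyHead_modifyHead]
    have hfun : (List.cons c ∘ fun x : List Char => pre ++ x) =
        (fun x : List Char => (c :: pre) ++ x) := by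
      funext x; simp
    rw [hfun]

-- pvP of a comma-free part
theorem pvP_single (part : List Char) (h : ∀ c ∈ part, c ≠ ',') :
    pvP part = if part = [] then [] else [part] := by
  have hsplit : List.splitOn ',' part = [part] := by
    unfold List.splitOn
    exact List.splitOnP_eq_single _ _ (by intro x hx; simpa using h x hx)
  unfold pvP
  rw [hsplit]
  by_cases hp : part = [] <;> simp [hp]

-- pvP after prepending "<comma-free cur>," to a part
theorem pvP_comma (cur h : List Char) (hcur : ∀ c ∈ cur, c ≠ ',') :
    pvP (cur ++ ',' :: h) = (if cur = [] then [] else [cur ++ [',']]) ++ pvP h := by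
  have hsplit : List.splitOn ',' (cur ++ ',' :: h) = cur :: List.splitOn ',' h := by
    unfold List.splitOn
    rw [pvSplit_prepend _ cur _ (by intro c hc; simpa using hcur c hc), List.splitOnP_cons]
    simp
  obtain ⟨x, xs, hx⟩ : ∃ x xs, List.splitOn ',' h = x :: xs := by
    rcases hh : List.splitOn ',' h with _ | ⟨x, xs⟩
    · exact absurd hh (List.splitOnP_ne_nil _ _)
    · exact ⟨x, xs, rfl⟩
  unfold pvP
  rw [hsplit, hx]
  simp only [List.dropLast_cons_of_ne_nil (List.cons_ne_nil x xs), List.filter_cons,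
    List.getLastD_cons]
  by_cases hc : cur = []
  · simp [hc]
  · simp [hc]

-- recursive specification of the tokenization
def pvF : List Char → List Char → List (List Char)
  | cur, [] => if cur = [] then [] else [cur]
  | cur, c :: cs =>
    if c = ' ' ∨ c = ',' then
      (if cur = [] then pvF [] cs
       else (if c = ',' then cur ++ [','] else cur) :: pvF [] cs)
    else pvF (cur ++ [c]) cs

theorem pvF_nil (cur : List Char) : pvF cur [] = if cur = [] then [] else [cur] := rfl

theorem pvF_cons (cur : List Char) (c : Char) (cs : List Char) :
    pvF cur (c :: cs) =
      if c = ' ' ∨ c = ',' then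
        (if cur = [] then pvF [] cs
         else (if c = ',' then cur ++ [','] else cur) :: pvF [] cs)
      else pvF (cur ++ [c]) cs := rfl

theorem pvTokensA_eq_pvF_aux (cs : List Char) :
    ∀ (toks : List (List Char)) (cur : List Char),
      (if (cs.foldl pvTokStepA (toks, cur)).2 ≠ [] then
        (cs.foldl pvTokStepA (toks, cur)).1 ++ [(cs.foldl pvTokStepA (toks, cur)).2]
      else (cs.foldl pvTokStepA (toks, cur)).1) = toks ++ pvF cur cs := by
  induction cs with
  | nil =>
    intro toks cur
    simp only [List.foldl_nil, pvF_nil]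
    by_cases hc : cur = [] <;> simp [hc]
  | cons c cs ih =>
    intro toks cur
    simp only [List.foldl_cons]
    by_cases h1 : c = ' ' ∨ c = ','
    · by_cases h2 : cur = []
      · have hstep : pvTokStepA (toks, cur) c = (toks, cur) := by
          simp [pvTokStepA, h1, h2]
        rw [hstep, pvF_cons, if_pos h1, if_pos h2, h2]
        exact ih toks []
      · have hstep : pvTokStepA (toks, cur) c =
            (toks ++ [if c = ',' then cur ++ [','] else cur], []) := by
          simp only [pvTokStepA, if_pos h1, ne_eq, h2, not_false_eq_true, if_true]
        rw [hstep, pvF_cons, if_pos h1, if_neg h2,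
          ih (toks ++ [if c = ',' then cur ++ [','] else cur]) [], List.append_assoc]
        rfl
    · have hstep : pvTokStepA (toks, cur) c = (toks, cur ++ [c]) := by
        simp [pvTokStepA, h1]
      rw [hstep, pvF_cons, if_neg h1]
      exact ih toks (cur ++ [c])

theorem pvTokensA_eq_pvF (cs : List Char) : pvTokensA cs = pvF [] cs := by
  unfold pvTokensA
  simpa using pvTokensA_eq_pvF_aux cs [] []

theorem pvF_flatMap (cs : List Char) :
    ∀ (cur : List Char), (∀ c ∈ cur, c ≠ ' ' ∧ c ≠ ',') →
      pvF cur cs = ((List.splitOn ' ' cs).modifyHead (cur ++ ·)).flatMap pvP := by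
  induction cs with
  | nil =>
    intro cur hcur
    rw [List.splitOn_nil]
    simp only [List.modifyHead, List.append_nil, List.flatMap_cons, List.flatMap_nil,
      List.append_nil]
    rw [pvP_single cur (fun c hc => (hcur c hc).2)]
    rfl
  | cons c cs ih =>
    intro cur hcur
    have hid : pvF [] cs = (List.splitOn ' ' cs).flatMap pvP := by
      rw [ih [] (by simp)]
      have : (fun x : List Char => [] ++ x) = id := by funext x; simp
      rw [this, List.modifyHead_id]
      rfl
    obtain ⟨x, xs, hx⟩ : ∃ x xs, List.splitOn ' ' cs = x :: xs := by
      rcases hh : List.splitOn ' ' cs with _ | ⟨x, xs⟩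
      · exact absurd hh (List.splitOnP_ne_nil _ _)
      · exact ⟨x, xs, rfl⟩
    by_cases hsp : c = ' '
    · have hsplit : List.splitOn ' ' (c :: cs) = [] :: List.splitOn ' ' cs := by
        unfold List.splitOn
        rw [List.splitOnP_cons, if_pos (by simp [hsp])]
      rw [hsplit]
      simp only [List.modifyHead, List.append_nil, List.flatMap_cons]
      unfold pvF
      rw [if_pos (Or.inl hsp), hid]
      rw [pvP_single cur (fun d hd => (hcur d hd).2)]
      by_cases hc2 : cur = []
      · simp [hc2]
      · simp [hc2, if_neg (by simp [hsp] : ¬ c = ',')]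
    · by_cases hcm : c = ','
      · have hsplit : List.splitOn ' ' (c :: cs) =
            (List.splitOn ' ' cs).modifyHead (c :: ·) := by
          unfold List.splitOn
          rw [List.splitOnP_cons, if_neg (by simp [hcm])]
        rw [hsplit, hx]
        simp only [List.modifyHead, List.flatMap_cons]
        have hrw : cur ++ c :: x = (cur ++ [',']) ++ x := by simp [hcm]
        rw [hrw]
        have : (cur ++ [',']) ++ x = cur ++ ',' :: x := by simp
        rw [this, pvP_comma cur x (fun d hd => (hcur d hd).2)]
        unfold pvF
        rw [if_pos (Or.inr hcm), hid, hx]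
        simp only [List.flatMap_cons]
        by_cases hc2 : cur = []
        · simp [hc2]
        · simp [hc2, hcm]
      · have hsplit : List.splitOn ' ' (c :: cs) =
            (List.splitOn ' ' cs).modifyHead (c :: ·) := by
          unfold List.splitOn
          rw [List.splitOnP_cons, if_neg (by simp [hsp])]
        rw [hsplit, hx]
        simp only [List.modifyHead]
        unfold pvF
        rw [if_neg (by tauto)]
        rw [ih (cur ++ [c]) (by
          intro d hd
          rcases List.mem_append.1 hd with hd | hd
          · exact hcur d hd
          · simp at hd; subst hd; exact ⟨hsp, hcm⟩), hx]
        simp only [List.modifyHead]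
        rw [List.append_assoc]
        rfl

-- the two tokenizers agree
theorem pvTok_eq (cs : List Char) : pvTokensA cs = pvTokensB cs := by
  rw [pvTokensA_eq_pvF, pvTokensB_flatMap, pvF_flatMap cs [] (by simp)]
  have : (fun x : List Char => [] ++ x) = id := by funext x; simp
  rw [this, List.modifyHead_id]
  rfl

theorem pvTokensB_ne_nil (cs : List Char) : ∀ t ∈ pvTokensB cs, t ≠ [] := by
  rw [← pvTok_eq]
  exact pvTokensA_ne_nil cs

-- length of ' '.join
def pvLenSum (ls : List (List Char)) : Int := (ls.map (fun t => (t.length : Int))).sum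

theorem pvJoin_len : ∀ (ls : List (List Char)), ls ≠ [] →
    ((PySem.Chars.join [' '] ls).length : Int) = pvLenSum ls + ls.length - 1 := by
  intro ls
  induction ls with
  | nil => simp
  | cons a tail ih =>
    intro _
    cases tail with
    | nil => simp [PySem.Chars.join_singleton, pvLenSum]
    | cons b rest =>
      rw [PySem.Chars.join_cons_cons]
      have hih := ih (by simp)
      simp only [pvLenSum, List.map_cons, List.sum_cons, List.length_cons,
        List.length_append] at hih ⊢
      push_cast at hih ⊢
      rw [hih]
      simp
      ring

-- joining after appending a whole block of tokens
theorem pvJoin_append_len2 (cur e : List (List Char)) (hcur : cur ≠ []) :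
    ((PySem.Chars.join [' '] (cur ++ e)).length : Int) =
      ((PySem.Chars.join [' '] cur).length : Int) + pvLenSum e + e.length := by
  rw [pvJoin_len _ (by simp [hcur]), pvJoin_len _ hcur]
  simp only [pvLenSum, List.map_append, List.sum_append, List.length_append]
  push_cast
  ring

-- prefix length sums grow by at least one per (nonempty) token
theorem pvLenSum_take_lower (tokens : List (List Char)) (hne : ∀ t ∈ tokens, t ≠ [])
    (i j : Nat) (hij : i ≤ j) (hj : j ≤ tokens.length) :
    pvLenSum (tokens.take i) + ((j : Int) - i) ≤ pvLenSum (tokens.take j) := by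
  induction j with
  | zero => interval_cases i; simp
  | succ j ih =>
    by_cases h : i = j + 1
    · subst h; simp
    · have hij' : i ≤ j := by omega
      have hj' : j ≤ tokens.length := by omega
      have := ih hij' hj'
      have hjlt : j < tokens.length := by omega
      have htake : tokens.take (j + 1) = tokens.take j ++ [tokens[j]] := by
        rw [List.take_add_one]
        simp [List.getElem?_eq_getElem hjlt]
      have hlen : 1 ≤ (tokens[j].length : Int) := by
        have := hne tokens[j] (List.getElem_mem hjlt)
        have : tokens[j].length ≠ 0 := by simpa [List.length_eq_zero_iff] using this
        omega
      rw [htake]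
      simp only [pvLenSum, List.map_append, List.sum_append, List.map_cons, List.sum_cons,
        List.map_nil, List.sum_nil] at *
      push_cast at *
      omega

-- first-line length at break m (m tokens on the first line)
def pvL (tokens : List (List Char)) (m : Nat) : Int :=
  pvLenSum (tokens.take m) + m - 1

theorem pvL_succ (tokens : List (List Char)) (k : Nat) (hk : k < tokens.length) :
    pvL tokens (k + 1) = pvL tokens k + (tokens[k].length : Int) + 1 := by
  have htake : tokens.take (k + 1) = tokens.take k ++ [tokens[k]] := by
    rw [List.take_add_one]
    simp [List.getElem?_eq_getElem hk]
  unfold pvL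
  rw [htake]
  simp only [pvLenSum, List.map_append, List.sum_append, List.map_cons, List.sum_cons,
    List.map_nil, List.sum_nil]
  push_cast
  ring

-- strict monotonicity and positivity of the first-line length
theorem pvL_lt (tokens : List (List Char)) (hne : ∀ t ∈ tokens, t ≠ [])
    {k m : Nat} (hk : k < m) (hm : m ≤ tokens.length) : pvL tokens k < pvL tokens m := by
  have h := pvLenSum_take_lower tokens hne k m (le_of_lt hk) hm
  unfold pvL
  omega

theorem pvL_pos (tokens : List (List Char)) (hne : ∀ t ∈ tokens, t ≠ [])
    {m : Nat} (h1 : 1 ≤ m) (hm : m ≤ tokens.length) : 0 < pvL tokens m := by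
  have h := pvLenSum_take_lower tokens hne 0 m (by omega) hm
  have h0 : pvLenSum (tokens.take 0) = 0 := rfl
  unfold pvL
  omega

-- characterization of A's break-search fold: its best break is the LARGEST
-- valid break index (valid break indices form a prefix, by monotonicity)
theorem pvAFold_char (tokens : List (List Char)) (hne : ∀ t ∈ tokens, t ≠ []) (th : Int) :
    ∀ m : Nat, 1 ≤ m → m ≤ tokens.length →
    0 ≤ ((PySem.List.pyRange 1 (m : Int)).foldl (pvBreakStepA tokens th) (0, 0)).1 ∧
    ((PySem.List.pyRange 1 (m : Int)).foldl (pvBreakStepA tokens th) (0, 0)).1 ≤ (m : Int) - 1 ∧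
    (∀ i : Nat, 1 ≤ i → i < m →
      (pvL tokens i ≤ th ↔ (i : Int) ≤ ((PySem.List.pyRange 1 (m : Int)).foldl (pvBreakStepA tokens th) (0, 0)).1)) ∧
    (((PySem.List.pyRange 1 (m : Int)).foldl (pvBreakStepA tokens th) (0, 0)).1 = 0 →
      ((PySem.List.pyRange 1 (m : Int)).foldl (pvBreakStepA tokens th) (0, 0)).2 = 0) ∧
    (((PySem.List.pyRange 1 (m : Int)).foldl (pvBreakStepA tokens th) (0, 0)).1 ≠ 0 →
      ((PySem.List.pyRange 1 (m : Int)).foldl (pvBreakStepA tokens th) (0, 0)).2 =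
        pvL tokens ((PySem.List.pyRange 1 (m : Int)).foldl (pvBreakStepA tokens th) (0, 0)).1.toNat) := by
  intro m
  induction m with
  | zero => omega
  | succ m ih =>
    intro _ h2
    by_cases hm : m = 0
    · subst hm
      have hr : PySem.List.pyRange 1 ((1 : Nat) : Int) = [] := by decide
      push_cast at hr ⊢
      rw [hr]
      refine ⟨by norm_num, by norm_num, ?_, fun _ => rfl, fun h => absurd rfl h⟩
      intro i hi1 hi2
      omega
    · have h1' : 1 ≤ m := by omega
      have h2' : m ≤ tokens.length := by omega
      obtain ⟨hge, hle, hiff, h0, hL⟩ := ih h1' h2'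
      have hrange : PySem.List.pyRange 1 ((m + 1 : Nat) : Int) =
          PySem.List.pyRange 1 (m : Nat) ++ [((m : Nat) : Int)] := by
        push_cast
        exact PySem.List.pyRange_one_succ_right (by exact_mod_cast h1')
      have htake : tokens.take m ≠ [] := by
        rw [ne_eq, List.take_eq_nil_iff]
        push_neg
        constructor
        · omega
        · intro h
          rw [h] at h2'
          simp at h2'
          omega
      have hjoinlen : ((PySem.Chars.join [' ']
          (PySem.List.slice tokens none (some ((m : Nat) : Int)))).length : Int) = pvL tokens m := by
        rw [PySem.List.slice_to tokens (by positivity), Int.toNat_natCast,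
          pvJoin_len _ htake]
        unfold pvL
        rw [List.length_take_of_le h2']
      rw [hrange]
      simp only [List.foldl_append, List.foldl_cons, List.foldl_nil]
      set st := (PySem.List.pyRange 1 ((m : Nat) : Int)).foldl (pvBreakStepA tokens th) (0, 0) with hst
      have hstepA : pvBreakStepA tokens th st ((m : Nat) : Int) =
          if pvL tokens m ≤ th then
            (if pvL tokens m > st.2 then (((m : Nat) : Int), pvL tokens m) else st)
          else st := by
        simp only [pvBreakStepA]
        rw [hjoinlen]
      rw [hstepA]
      by_cases hfit : pvL tokens m ≤ th
      · have hlt : st.2 < pvL tokens m := by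
          by_cases ha : st.1 = 0
          · rw [h0 ha]; exact pvL_pos tokens hne h1' h2'
          · rw [hL ha]
            exact pvL_lt tokens hne (by omega) h2'
        rw [if_pos hfit, if_pos hlt]
        refine ⟨by positivity, by push_cast; omega, ?_, by intro h; simp at h; omega, ?_⟩
        · intro i hi1 hi2
          simp only
          constructor
          · intro _; exact_mod_cast by omega
          · intro _
            by_cases him : i = m
            · subst him; exact hfit
            · exact le_of_lt (lt_of_lt_of_le (pvL_lt tokens hne (by omega) h2') hfit)
        · intro _
          simp only [Int.toNat_natCast]
      · rw [if_neg hfit]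
        refine ⟨hge, by push_cast; omega, ?_, h0, hL⟩
        intro i hi1 hi2
        by_cases him : i = m
        · subst him
          constructor
          · intro h; exact absurd h hfit
          · intro h; omega
        · exact hiff i hi1 (by omega)

-- B's prefix table holds exactly the first-line lengths
theorem pvPref_take (tokens : List (List Char)) :
    ∀ k : Nat, k ≤ tokens.length →
      (tokens.take k).foldl pvPrefStep ([0], -1) =
        (0 :: (List.range' 1 k).map (fun i => pvL tokens i), pvL tokens k) := by
  intro k
  induction k with
  | zero =>
    intro _
    simp [pvL, pvLenSum]
  | succ k ih =>
    intro hk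
    have hk' : k < tokens.length := by omega
    have htake : tokens.take (k + 1) = tokens.take k ++ [tokens[k]] := by
      rw [List.take_add_one]
      simp [List.getElem?_eq_getElem hk']
    rw [htake, List.foldl_append, ih (by omega)]
    simp only [List.foldl_cons, List.foldl_nil, pvPrefStep]
    have hsucc := pvL_succ tokens k hk'
    have hrange : List.range' 1 (k + 1) = List.range' 1 k ++ [1 + k] :=
      List.range'_1_concat
    rw [hrange]
    simp only [List.map_append, List.map_cons, List.map_nil]
    rw [show (1 + k) = k + 1 by omega, hsucc]
    simp

theorem pvPref_getD (tokens : List (List Char)) (i : Int)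
    (h1 : 1 ≤ i) (h2 : i ≤ (tokens.length : Int)) :
    PySem.List.pyGetD (tokens.foldl pvPrefStep ([0], -1)).1 i 0 = pvL tokens i.toNat := by
  have hfold := pvPref_take tokens tokens.length le_rfl
  rw [List.take_length] at hfold
  have hfst : (tokens.foldl pvPrefStep ([0], -1)).1 =
      (0 : Int) :: (List.range' 1 tokens.length).map (fun j => pvL tokens j) := by
    rw [hfold]
  rw [hfst]
  have hlen : ((0 : Int) :: (List.range' 1 tokens.length).map (fun j => pvL tokens j)).length
      = tokens.length + 1 := by simp
  rw [PySem.List.pyGetD_eq_getElem _ 0 (by omega) (by rw [hlen]; push_cast; omega)]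
  obtain ⟨j, hj⟩ : ∃ j, i.toNat = j + 1 := ⟨i.toNat - 1, by omega⟩
  simp only [hj, List.getElem_cons_succ, List.getElem_map, List.getElem_range']
  congr 1
  omega

-- the binary search finds the unique B with "valid ↔ ≤ B" on its window
theorem pvBS_eq (pref : List Int) (th : Int) (B : Int) :
    ∀ n : Nat, ∀ lo hi : Int, (hi - lo).toNat = n → lo ≤ B → B ≤ hi →
      (∀ i : Int, lo < i → i ≤ hi → (PySem.List.pyGetD pref i 0 ≤ th ↔ i ≤ B)) →
      pvBS pref th lo hi = B := by
  intro n
  induction n using Nat.strong_induction_on with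
  | _ n ih =>
    intro lo hi hn hloB hBhi hP
    rw [pvBS]
    by_cases hlh : lo < hi
    · rw [dif_pos hlh]
      obtain ⟨hm1, hm2⟩ := pvMid_bounds lo hi hlh
      set mid := PySem.Int.floordiv (lo + hi + 1) 2 with hmid
      by_cases hc : PySem.List.pyGetD pref mid 0 ≤ th
      · rw [if_pos hc]
        have hmB : mid ≤ B := (hP mid (by omega) hm2).1 hc
        exact ih (hi - mid).toNat (by omega) mid hi rfl hmB hBhi
          (fun i hi1 hi2 => hP i (by omega) hi2)
      · rw [if_neg hc]
        have hmB : B ≤ mid - 1 := by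
          by_contra hcon
          exact hc ((hP mid (by omega) hm2).2 (by omega))
        exact ih ((mid - 1) - lo).toNat (by omega) lo (mid - 1) rfl hloB hmB
          (fun i hi1 hi2 => hP i hi1 (by omega))
    · rw [dif_neg hlh]
      omega

-- ===== greedy side =====

-- A's greedy loop is frozen once broken
theorem pvGreedyA_frozen (th ml : Int) (lines cur : List (List Char))
    (rest : List (List Char)) :
    rest.foldl (pvGreedyStepA th ml) (lines, cur, true) = (lines, cur, true) := by
  induction rest with
  | nil => rfl
  | cons t ts ih =>
    simp only [List.foldl_cons]
    have : pvGreedyStepA th ml (lines, cur, true) t = (lines, cur, true) := by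
      simp [pvGreedyStepA]
    rw [this, ih]

-- specification of B's counting loop
theorem pvTakeAux_spec (th : Int) :
    ∀ (ts : List (List Char)) (w : Int),
      pvTakeAux th w ts ≤ ts.length ∧
      (∀ j : Nat, 1 ≤ j → j ≤ pvTakeAux th w ts →
        w + pvLenSum (ts.take j) + (j : Int) ≤ th) ∧
      (pvTakeAux th w ts < ts.length →
        w + pvLenSum (ts.take (pvTakeAux th w ts + 1)) + ((pvTakeAux th w ts : Int) + 1) > th) := by
  intro ts
  induction ts with
  | nil =>
    intro w
    refine ⟨by simp [pvTakeAux], ?_, by simp [pvTakeAux]⟩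
    intro j hj1 hj2
    simp [pvTakeAux] at hj2
    omega
  | cons t ts ih =>
    intro w
    by_cases hgt : w + 1 + (t.length : Int) > th
    · have ha : pvTakeAux th w (t :: ts) = 0 := by simp [pvTakeAux, hgt]
      refine ⟨by simp [ha], ?_, ?_⟩
      · intro j hj1 hj2
        rw [ha] at hj2
        omega
      · intro _
        rw [ha]
        simp only [List.take_succ_cons, List.take_zero, pvLenSum, List.map_cons, List.map_nil,
          List.sum_cons, List.sum_nil]
        push_cast
        omega
    · obtain ⟨ih1, ih2, ih3⟩ := ih (w + 1 + (t.length : Int))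
      have ha : pvTakeAux th w (t :: ts) = 1 + pvTakeAux th (w + 1 + (t.length : Int)) ts := by
        simp [pvTakeAux, hgt]
      refine ⟨by rw [ha]; simp; omega, ?_, ?_⟩
      · intro j hj1 hj2
        rw [ha] at hj2
        match j, hj1 with
        | 1, _ =>
          simp only [List.take_succ_cons, List.take_zero, pvLenSum, List.map_cons, List.map_nil,
            List.sum_cons, List.sum_nil]
          push_cast
          omega
        | (j' + 2), _ =>
          have hj' : 1 ≤ j' + 1 ∧ j' + 1 ≤ pvTakeAux th (w + 1 + (t.length : Int)) ts := by omega
          have := ih2 (j' + 1) hj'.1 hj'.2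
          simp only [List.take_succ_cons, pvLenSum, List.map_cons, List.sum_cons] at this ⊢
          push_cast at this ⊢
          omega
      · intro hlt
        rw [ha] at hlt ⊢
        rw [Nat.add_comm 1 (pvTakeAux th (w + 1 + (t.length : Int)) ts)] at hlt ⊢
        have hlt' : pvTakeAux th (w + 1 + (t.length : Int)) ts < ts.length := by
          simp at hlt
          omega
        have h3 := ih3 hlt'
        simp only [List.take_succ_cons, pvLenSum, List.map_cons, List.sum_cons] at h3 ⊢
        push_cast at h3 ⊢
        omega

-- a whole fitting block of tokens is absorbed into the current line
theorem pvAbsorb (th ml : Int) (ext : List (List Char)) :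
    ∀ (lines cur : List (List Char)), cur ≠ [] →
      (∀ j : Nat, 1 ≤ j → j ≤ ext.length →
        ((PySem.Chars.join [' '] (cur ++ ext.take j)).length : Int) ≤ th) →
      ext.foldl (pvGreedyStepA th ml) (lines, cur, false) = (lines, cur ++ ext, false) := by
  induction ext with
  | nil => intro lines cur _ _; simp
  | cons e ext ih =>
    intro lines cur hcur hfit
    simp only [List.foldl_cons]
    have h1 : ((PySem.Chars.join [' '] (cur ++ [e])).length : Int) ≤ th := by
      have := hfit 1 le_rfl (by simp)
      simpa using this
    have hstep : pvGreedyStepA th ml (lines, cur, false) e = (lines, cur ++ [e], false) := by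
      simp only [pvGreedyStepA, Bool.false_eq_true, if_false]
      rw [if_pos h1]
    rw [hstep, ih lines (cur ++ [e]) (by simp) ?_]
    · simp
    · intro j hj1 hj2
      have := hfit (j + 1) (by omega) (by simpa using by omega)
      simpa [List.take_succ_cons, List.append_assoc] using this

-- A's post-loop finalization
def pvFinA (ml : Int) (st : List (List Char) × List (List Char) × Bool) : List (List Char) :=
  if st.2.1 ≠ [] ∧ (st.1.length : Int) < ml then st.1 ++ [PySem.Chars.join [' '] st.2.1]
  else st.1

-- main greedy equivalence: A's state machine computes B's chunk decomposition
theorem pvGreedy_main (th ml : Int) :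
    ∀ n : Nat, ∀ rest : List (List Char), rest.length = n →
      ∀ lines : List (List Char), (lines.length : Int) < ml →
        (pvFinA ml (rest.foldl (pvGreedyStepA th ml) (lines, [], false)) =
          pvPack th ml rest lines) ∧
        (∀ t : List Char,
          pvFinA ml (rest.foldl (pvGreedyStepA th ml) (lines, [t], false)) =
            pvPack th ml (t :: rest) lines) := by
  intro n
  induction n using Nat.strong_induction_on with
  | _ n ih =>
    intro rest hrest lines hlines
    have part2 : ∀ t : List Char,
        pvFinA ml (rest.foldl (pvGreedyStepA th ml) (lines, [t], false)) =
          pvPack th ml (t :: rest) lines := by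
      intro t
      obtain ⟨ha_le, hfitW, hmaxW⟩ := pvTakeAux_spec th rest (t.length : Int)
      set a := pvTakeAux th (t.length : Int) rest with hadef
      have hsplit : rest = rest.take a ++ rest.drop a := (List.take_append_drop a rest).symm
      have hjoinT : ∀ j : Nat, j ≤ rest.length →
          ((PySem.Chars.join [' '] ([t] ++ rest.take j)).length : Int) =
            (t.length : Int) + pvLenSum (rest.take j) + (j : Int) := by
        intro j hj
        rw [pvJoin_append_len2 [t] (rest.take j) (by simp)]
        rw [PySem.Chars.join_singleton]
        rw [List.length_take_of_le hj]
      have habsorb : (rest.take a).foldl (pvGreedyStepA th ml) (lines, [t], false) =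
          (lines, [t] ++ rest.take a, false) := by
        apply pvAbsorb
        · simp
        · intro j hj1 hj2
          rw [List.length_take_of_le ha_le] at hj2
          rw [List.take_take, min_eq_left hj2]
          rw [hjoinT j (by omega)]
          exact hfitW j hj1 hj2
      have hfold1 : rest.foldl (pvGreedyStepA th ml) (lines, [t], false) =
          (rest.drop a).foldl (pvGreedyStepA th ml) (lines, [t] ++ rest.take a, false) := by
        conv_lhs => rw [hsplit]
        rw [List.foldl_append, habsorb]
      have hpack : pvPack th ml (t :: rest) lines =
          pvPack th ml (rest.drop a)
            (lines ++ [PySem.Chars.join [' '] ([t] ++ rest.take a)]) := by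
        rw [pvPack, if_neg (by omega)]
        simp only [← hadef, Nat.add_comm 1 a, List.drop_succ_cons, List.take_succ_cons,
          List.singleton_append]
      rcases hd : rest.drop a with _ | ⟨u, rs3⟩
      · -- no more tokens after the chunk
        rw [hfold1, hd]
        simp only [List.foldl_nil]
        rw [hpack, hd]
        rw [pvPack]
        unfold pvFinA
        rw [if_pos ⟨by simp, by simpa using hlines⟩]
      · -- the chunk is maximal: the next token overflows
        have halt : a < rest.length := by
          by_contra hcon
          have : rest.drop a = [] := List.drop_eq_nil_of_le (by omega)
          rw [hd] at this
          exact absurd this (by simp)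
        have hu : rest.take (a + 1) = rest.take a ++ [u] := by
          rw [List.take_add, hd]
          rfl
        have hover : ¬ ((PySem.Chars.join [' '] (([t] ++ rest.take a) ++ [u])).length : Int) ≤ th := by
          rw [List.append_assoc, ← hu, hjoinT (a + 1) (by omega)]
          have := hmaxW halt
          push_cast at this ⊢
          omega
        have hstep : pvGreedyStepA th ml (lines, [t] ++ rest.take a, false) u =
            (lines ++ [PySem.Chars.join [' '] ([t] ++ rest.take a)], [u],
              if ((lines ++ [PySem.Chars.join [' '] ([t] ++ rest.take a)]).length : Int) ≥ ml
              then true else false) := by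
          simp only [pvGreedyStepA, Bool.false_eq_true, if_false]
          rw [if_neg hover]
          simp
        rw [hfold1, hd]
        simp only [List.foldl_cons]
        rw [hstep]
        set lines' := lines ++ [PySem.Chars.join [' '] ([t] ++ rest.take a)] with hl'
        by_cases hb : (lines'.length : Int) ≥ ml
        · rw [if_pos hb, pvGreedyA_frozen]
          rw [hpack, hd, pvPack, if_pos hb]
          unfold pvFinA
          rw [if_neg (by push_neg; intro _; omega)]
        · rw [if_neg hb]
          have hrs3 : rs3.length < n := by
            have : (rest.drop a).length = rest.length - a := by simp
            rw [hd] at this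
            simp at this
            omega
          have := (ih rs3.length hrs3 rs3 rfl lines' (by omega)).2 u
          rw [this, hpack, hd]
      -- end part2
    refine ⟨?_, part2⟩
    rcases rest with _ | ⟨t, ts⟩
    · simp only [List.foldl_nil, pvPack]
      unfold pvFinA
      simp
    · simp only [List.foldl_cons]
      by_cases hfit : ((PySem.Chars.join [' '] ([] ++ [t])).length : Int) ≤ th
      · have hstep : pvGreedyStepA th ml (lines, [], false) t = (lines, [t], false) := by
          simp only [pvGreedyStepA, Bool.false_eq_true, if_false]
          rw [if_pos hfit]
          simp
        rw [hstep]
        have hts : ts.length < n := by simp at hrest; omega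
        exact (ih ts.length hts ts rfl lines hlines).2 t
      · -- the first token alone overflows: it becomes its own line
        have htlen : (t.length : Int) > th := by
          rw [List.nil_append, PySem.Chars.join_singleton] at hfit
          omega
        have hstep : pvGreedyStepA th ml (lines, [], false) t =
            (lines ++ [t], [],
              if ((lines ++ [t]).length : Int) ≥ ml then true else false) := by
          simp only [pvGreedyStepA, Bool.false_eq_true, if_false]
          rw [if_neg hfit]
          simp
        have ha0 : pvTakeAux th (t.length : Int) ts = 0 := by
          cases ts with
          | nil => rfl
          | cons s ss =>
            simp only [pvTakeAux]
            rw [if_pos (by have hs : (0 : Int) ≤ (s.length : Int) := Int.natCast_nonneg _; omega)]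
        have hpack : pvPack th ml (t :: ts) lines = pvPack th ml ts (lines ++ [t]) := by
          rw [pvPack, if_neg (by omega), ha0]
          simp only [List.drop_succ_cons, List.drop_zero, List.take_succ_cons, List.take_zero]
          rw [PySem.Chars.join_singleton]
        rw [hstep, hpack]
        by_cases hb : ((lines ++ [t]).length : Int) ≥ ml
        · rw [if_pos hb, pvGreedyA_frozen]
          unfold pvFinA
          simp only [ne_eq, not_true_eq_false, false_and, if_false]
          cases ts with
          | nil => rw [pvPack]
          | cons s ss => rw [pvPack, if_pos hb]
        · rw [if_neg hb]
          have hts : ts.length < n := by simp at hrest; omega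
          exact (ih ts.length hts ts rfl (lines ++ [t]) (by omega)).1

-- the chunk decomposition never produces more than max_lines lines
theorem pvPack_len (th ml : Int) :
    ∀ n : Nat, ∀ rest : List (List Char), rest.length = n →
      ∀ lines : List (List Char), (lines.length : Int) ≤ ml →
        ((pvPack th ml rest lines).length : Int) ≤ ml := by
  intro n
  induction n using Nat.strong_induction_on with
  | _ n ih =>
    intro rest hrest lines hlines
    rcases rest with _ | ⟨r0, rs⟩
    · rw [pvPack]; exact hlines
    · rw [pvPack]
      by_cases hb : (lines.length : Int) ≥ ml
      · rw [if_pos hb]; exact hlines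
      · rw [if_neg hb]
        have hk : 1 ≤ 1 + pvTakeAux th (r0.length : Int) rs := by omega
        have hlen : ((r0 :: rs).drop (1 + pvTakeAux th (r0.length : Int) rs)).length < n := by
          simp only [List.length_drop, List.length_cons]
          simp at hrest
          omega
        exact ih _ hlen _ rfl _
          (by simp only [List.length_append, List.length_cons, List.length_nil]; push_cast; omega)

-- with ml ≤ 0 A's loop emits at most one line (broken immediately)
theorem pvGreedyA_ml_nonpos (th ml : Int) (hml : ml ≤ 0) (rest : List (List Char)) :
    ∀ cur, ((rest.foldl (pvGreedyStepA th ml) ([], cur, false))).1.length ≤ 1 := by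
  induction rest with
  | nil => intro cur; simp
  | cons t ts ih =>
    intro cur
    simp only [List.foldl_cons]
    by_cases hfit : ((PySem.Chars.join [' '] (cur ++ [t])).length : Int) ≤ th
    · have : pvGreedyStepA th ml ([], cur, false) t = ([], cur ++ [t], false) := by
        simp only [pvGreedyStepA, Bool.false_eq_true, if_false]
        rw [if_pos hfit]
      rw [this]
      exact ih (cur ++ [t])
    · have hone : ∀ l : List Char, pvGreedyStepA th ml ([], cur, false) t =
          ([if cur ≠ [] then PySem.Chars.join [' '] cur else t], if cur ≠ [] then [t] else cur, true) := by
        intro _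
        simp only [pvGreedyStepA, Bool.false_eq_true, if_false]
        rw [if_neg hfit]
        by_cases hc : cur = []
        · simp only [hc, ne_eq, not_true_eq_false, if_false, List.nil_append]
          rw [if_pos (by simp; omega)]
        · simp only [ne_eq, hc, not_false_eq_true, if_true, List.nil_append]
          rw [if_pos (by simp; omega)]
      rw [hone []]
      rw [pvGreedyA_frozen]
      simp

-- a list of length ≤ 1 sliced [:m] with m ≤ 0 is empty
theorem pvSlice_nonpos {α : Type} (L : List α) (m : Int) (hm : m ≤ 0) (hL : L.length ≤ 1) :
    PySem.List.slice L none (some m) = [] := by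
  by_cases h0 : m = 0
  · subst h0
    rw [PySem.List.slice_to L le_rfl]
    simp
  · have hk : m = -(((-m).toNat : Nat) : Int) := by omega
    rw [hk, PySem.List.slice_to_neg_natCast L (-m).toNat (by omega)]
    have : L.length - (-m).toNat = 0 := by omega
    rw [this]
    simp

-- ===== VERDICT (by name: the statement is the Claim_ definition above) =====
theorem optimal_line_break_py_spec : Claim_equal_optimal_line_break_py := by
  intro text char_threshold max_lines _
  unfold Spec_optimal_line_break_py
  simp only [optimal_line_break_py, optimal_line_break_py_alt, pvTok_eq]
  have hne := pvTokensB_ne_nil text.toList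
  set tokens := pvTokensB text.toList with htok
  by_cases h0 : tokens.length = 0
  · rw [if_pos h0, if_pos (show tokens.length ≤ 1 by omega)]
  · rw [if_neg h0]
    by_cases h1 : tokens.length = 1
    · rw [if_pos h1, if_pos (show tokens.length ≤ 1 by omega)]
    · rw [if_neg h1, if_neg (show ¬ tokens.length ≤ 1 by omega)]
      by_cases hml : max_lines = 2
      · rw [if_pos hml, if_pos hml]
        obtain ⟨hge, hle, hiff, -, -⟩ :=
          pvAFold_char tokens hne char_threshold tokens.length (by omega) le_rfl
        set st := (PySem.List.pyRange 1 (tokens.length : Int)).foldl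
          (pvBreakStepA tokens char_threshold) (0, 0) with hst
        have hbs : pvBS (tokens.foldl pvPrefStep ([0], -1)).1 char_threshold 0
            ((tokens.length : Int) - 1) = st.1 := by
          apply pvBS_eq _ _ _ (((tokens.length : Int) - 1) - 0).toNat _ _ rfl hge hle
          intro i hi1 hi2
          rw [pvPref_getD tokens i (by omega) (by omega)]
          have := hiff i.toNat (by omega) (by omega)
          rwa [show ((i.toNat : Nat) : Int) = i by omega] at this
        rw [hbs]
        by_cases hb : st.1 > 0
        · rw [if_pos hb, if_pos hb]
        · rw [if_neg hb, if_neg hb]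
      · rw [if_neg hml, if_neg hml]
        by_cases hml0 : max_lines ≤ 0
        · have hlen1 := pvGreedyA_ml_nonpos char_threshold max_lines hml0 tokens []
          set st := tokens.foldl (pvGreedyStepA char_threshold max_lines) ([], [], false) with hst
          have hfin : (if st.2.1 ≠ [] ∧ (st.1.length : Int) < max_lines
              then st.1 ++ [PySem.Chars.join [' '] st.2.1] else st.1) = st.1 := by
            rw [if_neg (by push_neg; intro _; omega)]
          rw [hfin, pvSlice_nonpos st.1 max_lines hml0 hlen1]
          obtain ⟨t, ts, hts⟩ := List.exists_cons_of_ne_nil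
            (show tokens ≠ [] by intro hcon; apply h0; rw [hcon]; rfl)
          rw [hts, pvPack, if_pos (show ((([] : List (List Char)).length : Int) ≥ max_lines) by
            simp only [List.length_nil, Nat.cast_zero]; omega)]
        · have hml1 : 1 ≤ max_lines := by omega
          have hmain := (pvGreedy_main char_threshold max_lines tokens.length tokens rfl []
            (by simpa using by omega)).1
          set st := tokens.foldl (pvGreedyStepA char_threshold max_lines) ([], [], false) with hst
          have hfin : (if st.2.1 ≠ [] ∧ (st.1.length : Int) < max_lines
              then st.1 ++ [PySem.Chars.join [' '] st.2.1] else st.1) = pvFinA max_lines st := rfl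
          rw [hfin, hmain]
          have hplen := pvPack_len char_threshold max_lines tokens.length tokens rfl []
            (by simp; omega)
          rw [PySem.List.slice_to _ (by omega)]
          rw [List.take_of_length_le (by omega)]
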